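-- pv_equiv track=rewrite | github.com/muyaaho/algorithm | 프로그래머스/lv1/42862. 체육복/체육복.py | solution
-- ===== SOURCE A (Python) =====
-- def solution(n, lost, reserve):
--     answer = 0
--     k = 0
--     # 중복데이터 제거 및 카운팅
--     cp_lost = lost[:]
--     cp_reserve =reserve[:]
--
--     for i in range(len(lost)):
--         if lost[i] in reserve:
--             cp_reserve.remove(lost[i])
--             cp_lost.remove(lost[i])
--     cp_lost.sort()
--     cp_reserve.sort()
--     while cp_lost and cp_reserve:
--         v = cp_lost.pop(0)
--         if v-1 in cp_reserve:
--             cp_reserve.remove(v-1)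
--         elif v+1 in cp_reserve:
--             cp_reserve.remove(v+1)
--         else:
--             k += 1
--
--     if cp_lost:
--         k = k + len(cp_lost)
--     answer = n - k
--     return answer
-- ===== SOURCE B (Python) =====
-- def solution(n, lost, reserve):
--     # subtract lost from reserve counts, then a two-pointer merge of the
--     # sorted leftover-lost and leftover-reserve lists
--     cnt = {}
--     for v in reserve:
--         cnt[v] = cnt.get(v, 0) + 1
--     for v in lost:
--         if v in cnt:
--             cnt[v] -= 1
--     need = sorted(v for v in lost if v not in cnt)
--     spare = []
--     for v in sorted(cnt):
--         spare.extend([v] * cnt[v])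
--     i = j = 0
--     miss = 0
--     while i < len(need) and j < len(spare):
--         if spare[j] < need[i] - 1:
--             j += 1
--         elif spare[j] > need[i] + 1:
--             miss += 1
--             i += 1
--         else:
--             i += 1
--             j += 1
--     miss += len(need) - i
--     return n - miss
-- ===== Notes on version B (the rewrite author's own statement) =====
-- stated objective: faster
-- what changed: A's per-student simulation (linear membership tests, list.remove, pop(0), prefer v-1 then v+1) is replaced by one counter-subtraction pass and a two-pointer merge of the sorted leftover-lost and leftover-reserve lists, with no per-element search or preference branching.
import Mathlib
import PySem

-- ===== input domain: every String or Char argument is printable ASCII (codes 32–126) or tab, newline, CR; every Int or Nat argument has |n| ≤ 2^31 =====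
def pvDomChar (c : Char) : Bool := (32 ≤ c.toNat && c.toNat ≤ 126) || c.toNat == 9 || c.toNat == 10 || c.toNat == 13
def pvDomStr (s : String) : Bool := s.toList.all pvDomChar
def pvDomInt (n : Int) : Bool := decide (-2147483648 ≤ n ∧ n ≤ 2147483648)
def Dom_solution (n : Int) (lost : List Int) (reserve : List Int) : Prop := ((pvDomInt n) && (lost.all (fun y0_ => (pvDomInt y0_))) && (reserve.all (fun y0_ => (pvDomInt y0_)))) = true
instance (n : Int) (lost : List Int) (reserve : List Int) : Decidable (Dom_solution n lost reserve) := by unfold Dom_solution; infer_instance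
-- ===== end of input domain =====

-- B replaces A's per-student list simulation (membership tests, list.remove, pop(0),
-- prefer v-1 then v+1) by counter subtraction and a two-pointer merge of the two sorted
-- leftover lists (objective: faster).

-- ===== PORT A =====
-- the cancellation loop body: for i in range(len(lost)): if lost[i] in reserve: remove from both copies
def solCancelStep (reserve : List Int) (st : List Int × List Int) (v : Int) : List Int × List Int :=
  if v ∈ reserve then
    ((PySem.List.remove? st.1 v).getD st.1, (PySem.List.remove? st.2 v).getD st.2)
  else st

-- the while loop: while cp_lost and cp_reserve: v = cp_lost.pop(0); …  followed by
-- 'if cp_lost: k += len(cp_lost)' (the remaining lost when the reserve ran out)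
def solWhile : List Int → List Int → Int → Int
  | [], _, k => k
  | v :: rest, r, k =>
    if r.isEmpty then k + (v :: rest).length
    else if v - 1 ∈ r then solWhile rest ((PySem.List.remove? r (v - 1)).getD r) k
    else if v + 1 ∈ r then solWhile rest ((PySem.List.remove? r (v + 1)).getD r) k
    else solWhile rest r (k + 1)

def solution (n : Int) (lost : List Int) (reserve : List Int) : Int :=
  let st := (PySem.List.pyRange 0 (PySem.List.len lost) 1).foldl
      (fun st i => solCancelStep reserve st (PySem.List.pyGetD lost i 0)) (lost, reserve)
  let cpLost := PySem.List.sorted st.1 (fun x => x) false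
  let cpReserve := PySem.List.sorted st.2 (fun x => x) false
  n - solWhile cpLost cpReserve 0

-- ===== PORT B =====
-- the two-pointer while loop over the suffixes need[i:], spare[j:]
def altTP : List Int → List Int → Int → Int
  | [], _, miss => miss
  | a :: need, [], miss => miss + (a :: need).length
  | a :: need, b :: spare, miss =>
    if b < a - 1 then altTP (a :: need) spare miss
    else if b > a + 1 then altTP need (b :: spare) (miss + 1)
    else altTP need spare miss
  termination_by need spare _ => (need.length, spare.length)

def solution_alt (n : Int) (lost : List Int) (reserve : List Int) : Int :=
  let cnt0 := reserve.foldl (fun d v => d.insert v (d.getD v 0 + 1)) (PySem.Dict.empty : PySem.Dict Int Int)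
  let cnt := lost.foldl (fun d v => if d.contains v then d.insert v (d.getD v 0 - 1) else d) cnt0
  let need := PySem.List.sorted (lost.filter (fun v => !(cnt.contains v))) (fun x => x) false
  let spare := (PySem.List.sorted cnt.keys (fun x => x) false).foldl
      (fun acc v => acc ++ List.replicate (cnt.getD v 0).toNat v) []
  n - altTP need spare 0

-- ===== PRECONDITION & SPEC =====
-- Pre_ excludes exactly the inputs where A raises ValueError: some value shared by lost and
-- reserve occurs more often in lost than in reserve, so cp_reserve.remove runs dry.
def Pre_solution (n : Int) (lost : List Int) (reserve : List Int) : Prop :=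
  ∀ v ∈ lost, v ∈ reserve → lost.count v ≤ reserve.count v
instance (n : Int) (lost : List Int) (reserve : List Int) : Decidable (Pre_solution n lost reserve) := by unfold Pre_solution; infer_instance

def pvWitness_solution : Int × List Int × List Int := (5, [2, 4], [1, 3, 5])

def Spec_solution (n : Int) (lost : List Int) (reserve : List Int) (out : Int) : Prop := out = solution_alt n lost reserve
instance (n : Int) (lost : List Int) (reserve : List Int) (out : Int) : Decidable (Spec_solution n lost reserve out) := by unfold Spec_solution; infer_instance

-- ===== CLAIM (what is proved, stated in full; the proofs are below) =====
def Claim_equal_solution : Prop := ∀ (n : Int) (lost : List Int) (reserve : List Int), Dom_solution n lost reserve → Pre_solution n lost reserve → Spec_solution n lost reserve (solution n lost reserve)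

-- ===== LEMMAS AND PROOFS =====

-- A's cancellation loop, characterised by multiset counts (both components)
theorem cancelA_counts (reserve : List Int) : ∀ (l a b : List Int),
    (∀ x, x ∈ reserve → l.count x ≤ a.count x ∧ l.count x ≤ b.count x) →
    ∀ x, (l.foldl (solCancelStep reserve) (a, b)).1.count x
            = a.count x - (if x ∈ reserve then l.count x else 0)
       ∧ (l.foldl (solCancelStep reserve) (a, b)).2.count x
            = b.count x - (if x ∈ reserve then l.count x else 0) := by
  intro l
  induction l with
  | nil => intro a b _ x; simp
  | cons v rest ih =>
    intro a b hcnt x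
    have hvc : (v :: rest).count v = rest.count v + 1 := by simp
    simp only [List.foldl_cons]
    by_cases hv : v ∈ reserve
    · have hva : v ∈ a := by
        have := (hcnt v hv).1
        rw [hvc] at this
        exact List.count_pos_iff.mp (by omega)
      have hvb : v ∈ b := by
        have := (hcnt v hv).2
        rw [hvc] at this
        exact List.count_pos_iff.mp (by omega)
      have hstep : solCancelStep reserve (a, b) v = (a.erase v, b.erase v) := by
        simp [solCancelStep, hv, PySem.List.remove?_eq_some_erase a v hva,
          PySem.List.remove?_eq_some_erase b v hvb]
      rw [hstep]
      have hcnt' : ∀ y, y ∈ reserve → rest.count y ≤ (a.erase v).count y ∧ rest.count y ≤ (b.erase v).count y := by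
        intro y hy
        have := hcnt y hy
        by_cases hyv : y = v
        · subst hyv
          rw [List.count_erase_self, List.count_erase_self, hvc] at *
          omega
        · rw [List.count_erase_of_ne hyv, List.count_erase_of_ne hyv]
          have : (v :: rest).count y = rest.count y := by
            simp [Ne.symm hyv]
          omega
      have hres := ih (a.erase v) (b.erase v) hcnt' x
      by_cases hxv : x = v
      · subst hxv
        have := hcnt x hv
        rw [if_pos hv, hvc] at *
        rw [List.count_erase_self, List.count_erase_self] at hres
        omega
      · have hcx : (v :: rest).count x = rest.count x := by simp [Ne.symm hxv]
        rw [List.count_erase_of_ne hxv, List.count_erase_of_ne hxv] at hres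
        rw [hcx]
        exact hres
    · have hstep : solCancelStep reserve (a, b) v = (a, b) := by
        simp [solCancelStep, hv]
      rw [hstep]
      have hcnt' : ∀ y, y ∈ reserve → rest.count y ≤ a.count y ∧ rest.count y ≤ b.count y := by
        intro y hy
        have := hcnt y hy
        have : (v :: rest).count y = rest.count y ∨ (v :: rest).count y = rest.count y + 1 := by
          by_cases hyv : y = v
          · right; subst hyv; exact hvc
          · left; simp [Ne.symm hyv]
        omega
      have hres := ih a b hcnt' x
      by_cases hxr : x ∈ reserve
      · have hxv : x ≠ v := fun h => hv (h ▸ hxr)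
        have hcx : (v :: rest).count x = rest.count x := by simp [Ne.symm hxv]
        rw [if_pos hxr] at *
        rw [hcx]
        exact hres
      · rw [if_neg hxr] at *
        exact hres

-- B's subtraction loop never changes which keys a dict has
theorem sub_contains : ∀ (l : List Int) (d : PySem.Dict Int Int) (x : Int),
    (l.foldl (fun d v => if d.contains v then d.insert v (d.getD v 0 - 1) else d) d).contains x
      = d.contains x := by
  intro l
  induction l with
  | nil => intro d x; rfl
  | cons v rest ih =>
    intro d x
    simp only [List.foldl_cons]
    by_cases hv : d.contains v
    · rw [if_pos hv, ih, PySem.Dict.contains_insert]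
      by_cases hx : x = v
      · subst hx; simp [hv]
      · simp [hx]
    · rw [if_neg hv, ih]

-- B's subtraction loop on the counts
theorem sub_getD : ∀ (l : List Int) (d : PySem.Dict Int Int) (x : Int),
    (l.foldl (fun d v => if d.contains v then d.insert v (d.getD v 0 - 1) else d) d).getD x 0
      = d.getD x 0 - (if d.contains x then (l.count x : Int) else 0) := by
  intro l
  induction l with
  | nil => intro d x; simp
  | cons v rest ih =>
    intro d x
    simp only [List.foldl_cons]
    by_cases hv : d.contains v
    · rw [if_pos hv, ih, PySem.Dict.getD_insert]
      have hcont : (d.insert v (d.getD v 0 - 1)).contains x = d.contains x := by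
        rw [PySem.Dict.contains_insert]
        by_cases hx : x = v
        · simp [hx, hv]
        · simp [hx]
      rw [hcont]
      by_cases hx : x = v
      · rw [hx]
        rw [if_pos rfl, if_pos hv, if_pos hv]
        have : (v :: rest).count v = rest.count v + 1 := by simp
        rw [this]
        push_cast
        ring
      · rw [if_neg hx]
        have : (v :: rest).count x = rest.count x := by simp [Ne.symm hx]
        rw [this]
    · rw [if_neg hv, ih]
      by_cases hx : x = v
      · simp [hx, hv]
      · have : (v :: rest).count x = rest.count x := by simp [Ne.symm hx]
        rw [this]

-- counting a flatMap of replicates over distinct values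
theorem count_flatMap_replicate (c : Int → Nat) (x : Int) : ∀ (S : List Int), S.Nodup →
    (S.flatMap (fun k => List.replicate (c k) k)).count x = if x ∈ S then c x else 0 := by
  intro S
  induction S with
  | nil => intro _; simp
  | cons s t ih =>
    intro hnd
    rw [List.nodup_cons] at hnd
    rw [List.flatMap_cons, List.count_append, ih hnd.2, List.count_replicate]
    by_cases hsx : x = s
    · subst hsx; simp [hnd.1]
    · simp [Ne.symm hsx, hsx]

-- a flatMap of replicates over a weakly increasing list is weakly increasing
theorem pairwise_flatMap_replicate (c : Int → Nat) : ∀ (S : List Int),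
    S.Pairwise (· ≤ ·) → (S.flatMap (fun k => List.replicate (c k) k)).Pairwise (· ≤ ·) := by
  intro S
  induction S with
  | nil => intro _; simp
  | cons s t ih =>
    intro hp
    rw [List.pairwise_cons] at hp
    rw [List.flatMap_cons, List.pairwise_append]
    refine ⟨List.pairwise_replicate.mpr (Or.inr le_rfl), ih hp.2, ?_⟩
    intro a ha b hb
    rw [List.eq_of_mem_replicate ha]
    obtain ⟨y, hy, hby⟩ := List.mem_flatMap.mp hb
    rw [List.eq_of_mem_replicate hby]
    exact hp.1 y hy

-- A's loop with an empty reserve counts all remaining lost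
theorem solWhile_nil : ∀ (L : List Int) (k : Int), solWhile L [] k = k + L.length := by
  intro L k
  cases L with
  | nil => simp [solWhile]
  | cons a t => simp [solWhile]

-- a reserve head too small for every remaining lost value never matters to A's loop
theorem solWhile_drop (r : Int) : ∀ (L R : List Int) (k : Int),
    (∀ v ∈ L, r + 2 ≤ v) → solWhile L (r :: R) k = solWhile L R k := by
  intro L
  induction L with
  | nil => intro R k _; rfl
  | cons v L' ih =>
    intro R k hlo
    have hv : r + 2 ≤ v := hlo v List.mem_cons_self
    have h1r : v - 1 ≠ r := by omega
    have h2r : v + 1 ≠ r := by omega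
    have hm1 : (v - 1 ∈ r :: R) ↔ (v - 1 ∈ R) := by simp [h1r]
    have hm2 : (v + 1 ∈ r :: R) ↔ (v + 1 ∈ R) := by simp [h2r]
    have hlo' : ∀ w ∈ L', r + 2 ≤ w := fun w hw => hlo w (List.mem_cons_of_mem _ hw)
    simp only [solWhile, List.isEmpty_cons, Bool.false_eq_true, if_false]
    by_cases hb1 : v - 1 ∈ R
    · rw [if_pos (hm1.mpr hb1),
        PySem.List.remove?_cons_of_ne R (Ne.symm h1r),
        PySem.List.remove?_eq_some_erase R _ hb1]
      have hRne : R.isEmpty = false := by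
        cases R with
        | nil => cases hb1
        | cons a t => rfl
      simp only [hRne, Bool.false_eq_true, if_false]
      rw [if_pos hb1]
      simp only [Option.map_some, Option.getD_some]
      exact ih (R.erase (v - 1)) k hlo'
    · rw [if_neg ((not_congr hm1).mpr hb1)]
      by_cases hb2 : v + 1 ∈ R
      · rw [if_pos (hm2.mpr hb2),
          PySem.List.remove?_cons_of_ne R (Ne.symm h2r),
          PySem.List.remove?_eq_some_erase R _ hb2]
        have hRne : R.isEmpty = false := by
          cases R with
          | nil => cases hb2
          | cons a t => rfl
        simp only [hRne, Bool.false_eq_true, if_false]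
        rw [if_neg hb1, if_pos hb2]
        simp only [Option.map_some, Option.getD_some]
        exact ih (R.erase (v + 1)) k hlo'
      · rw [if_neg ((not_congr hm2).mpr hb2)]
        cases R with
        | nil =>
          rw [ih [] (k + 1) hlo', solWhile_nil]
          simp only [List.isEmpty_nil, if_true]
          push_cast [List.length_cons]
          omega
        | cons a t =>
          simp only [List.isEmpty_cons, Bool.false_eq_true, if_false, if_neg hb1, if_neg hb2]
          exact ih (a :: t) (k + 1) hlo'

-- A's greedy loop on disjoint sorted lists is B's two-pointer merge
theorem tp_eq_solWhile : ∀ (L R : List Int) (k : Int),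
    L.Pairwise (· ≤ ·) → R.Pairwise (· ≤ ·) → (∀ v ∈ L, v ∉ R) →
    solWhile L R k = altTP L R k := by
  intro L
  induction L with
  | nil => intro R k _ _ _; cases R <;> simp only [solWhile, altTP]
  | cons v L' ih =>
    intro R
    induction R with
    | nil =>
      intro k _ _ _
      simp [solWhile, altTP]
    | cons r R' ihR =>
      intro k hL hR hd
      have hLtail : L'.Pairwise (· ≤ ·) := (List.pairwise_cons.mp hL).2
      have hLlo : ∀ w ∈ L', v ≤ w := (List.pairwise_cons.mp hL).1
      have hRtail : R'.Pairwise (· ≤ ·) := (List.pairwise_cons.mp hR).2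
      have hRlo : ∀ w ∈ R', r ≤ w := (List.pairwise_cons.mp hR).1
      have hvr : v ≠ r := fun h => hd v List.mem_cons_self (h ▸ List.mem_cons_self)
      by_cases hb1 : r < v - 1
      · -- reserve head useless: both sides drop it
        have hdrop := solWhile_drop r (v :: L') R' k (by
          intro w hw
          rcases List.mem_cons.mp hw with h | h
          · omega
          · have := hLlo w h; omega)
        rw [hdrop]
        rw [show altTP (v :: L') (r :: R') k = altTP (v :: L') R' k by
          rw [altTP]; rw [if_pos hb1]]
        exact ihR k hL hRtail (fun w hw hmem => hd w hw (List.mem_cons_of_mem _ hmem))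
      · by_cases hb2 : v + 1 < r
        · -- lost head unmatched on both sides
          have hnm1 : v - 1 ∉ r :: R' := by
            intro h
            rcases List.mem_cons.mp h with h | h
            · omega
            · have := hRlo _ h; omega
          have hnm2 : v + 1 ∉ r :: R' := by
            intro h
            rcases List.mem_cons.mp h with h | h
            · omega
            · have := hRlo _ h; omega
          rw [show altTP (v :: L') (r :: R') k = altTP L' (r :: R') (k + 1) by
            rw [altTP]; rw [if_neg (by omega), if_pos (by omega)]]
          simp only [solWhile, List.isEmpty_cons, Bool.false_eq_true, if_false,
            if_neg hnm1, if_neg hnm2]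
          exact ih (r :: R') (k + 1) hLtail hR
            (fun w hw => hd w (List.mem_cons_of_mem _ hw))
        · -- adjacent: both sides match and advance
          have hcase : r = v - 1 ∨ r = v + 1 := by omega
          rw [show altTP (v :: L') (r :: R') k = altTP L' R' k by
            rw [altTP]; rw [if_neg (by omega), if_neg (by omega)]]
          have hd' : ∀ w ∈ L', w ∉ R' := fun w hw hmem =>
            hd w (List.mem_cons_of_mem _ hw) (List.mem_cons_of_mem _ hmem)
          rcases hcase with h | h
          · have hm : v - 1 ∈ r :: R' := by rw [h]; exact List.mem_cons_self
            simp only [solWhile, List.isEmpty_cons, Bool.false_eq_true, if_false, if_pos hm]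
            rw [show PySem.List.remove? (r :: R') (v - 1) = some R' by
              rw [← h]; exact PySem.List.remove?_cons_self r R']
            simp only [Option.getD_some]
            exact ih R' k hLtail hRtail hd'
          · have hnm1 : v - 1 ∉ r :: R' := by
              intro hmem
              rcases List.mem_cons.mp hmem with hh | hh
              · omega
              · have := hRlo _ hh; omega
            have hm : v + 1 ∈ r :: R' := by rw [h]; exact List.mem_cons_self
            simp only [solWhile, List.isEmpty_cons, Bool.false_eq_true, if_false,
              if_neg hnm1, if_pos hm]
            rw [show PySem.List.remove? (r :: R') (v + 1) = some R' by
              rw [← h]; exact PySem.List.remove?_cons_self r R']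
            simp only [Option.getD_some]
            exact ih R' k hLtail hRtail hd'

-- B's subtraction loop never changes the key list either
theorem sub_keys : ∀ (l : List Int) (d : PySem.Dict Int Int),
    (l.foldl (fun d v => if d.contains v then d.insert v (d.getD v 0 - 1) else d) d).keys
      = d.keys := by
  intro l
  induction l with
  | nil => intro d; rfl
  | cons v rest ih =>
    intro d
    simp only [List.foldl_cons]
    by_cases hv : d.contains v
    · rw [if_pos hv, ih, PySem.Dict.keys_insert_of_contains d _ hv]
    · rw [if_neg hv, ih]

-- the two programs agree on every input satisfying Pre_
theorem solution_eq (n : Int) (lost reserve : List Int) :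
    Pre_solution n lost reserve → solution n lost reserve = solution_alt n lost reserve := by
  intro hpre
  unfold Pre_solution at hpre
  unfold solution solution_alt
  dsimp only
  rw [PySem.List.foldl_pyRange_zero_pyGetD lost 0 (solCancelStep reserve) (lost, reserve)]
  rw [PySem.Dict.foldl_insert_getD_add_one_eq_counter]
  set stA := lost.foldl (solCancelStep reserve) (lost, reserve) with hstA
  set cnt := lost.foldl (fun d v => if d.contains v then d.insert v (d.getD v 0 - 1) else d)
      (PySem.Dict.counter reserve) with hcnt
  have hA := cancelA_counts reserve lost lost reserve (by
    intro x hx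
    refine ⟨le_rfl, ?_⟩
    by_cases hxl : x ∈ lost
    · exact hpre x hxl hx
    · simp [List.count_eq_zero_of_not_mem hxl])
  -- cnt's keys and counts
  have hkeys : cnt.keys = PySem.Set.ofList reserve := by
    rw [hcnt, sub_keys, PySem.Dict.keys_counter]
  have hcontains : ∀ x : Int, cnt.contains x = decide (x ∈ reserve) := by
    intro x
    rw [hcnt, sub_contains, PySem.Dict.contains_counter]
    simp
  have hgetD : ∀ x : Int, cnt.getD x 0
      = (reserve.count x : Int) - (if x ∈ reserve then (lost.count x : Int) else 0) := by
    intro x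
    rw [hcnt, sub_getD, PySem.Dict.getD_counter, PySem.Dict.contains_counter]
    by_cases hx : x ∈ reserve <;> simp [hx]
  -- the two leftover-lost lists are equal
  have hneed : PySem.List.sorted stA.1 (fun x => x) false
      = PySem.List.sorted (lost.filter (fun v => !(cnt.contains v))) (fun x => x) false := by
    apply PySem.List.sorted_eq_sorted_of_perm _ _ _ (fun a b h => h)
    apply List.perm_iff_count.mpr
    intro x
    rw [(hA x).1]
    by_cases hx : x ∈ reserve
    · have h0 : (lost.filter (fun v => !(cnt.contains v))).count x = 0 := by
        apply List.count_eq_zero.mpr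
        intro hmem
        have := (List.mem_filter.mp hmem).2
        rw [hcontains] at this
        simp [hx] at this
      rw [if_pos hx, h0]
      omega
    · have h1 : (lost.filter (fun v => !(cnt.contains v))).count x = lost.count x :=
        List.count_filter (by rw [hcontains]; simp [hx])
      rw [if_neg hx, h1]
      omega
  -- the two leftover-reserve lists are equal
  have hSnd : ∀ x : Int, stA.2.count x
      = reserve.count x - (if x ∈ reserve then lost.count x else 0) := fun x => (hA x).2
  set S := PySem.List.sorted cnt.keys (fun x => x) false with hS
  have hSmem : ∀ x : Int, x ∈ S ↔ x ∈ reserve := by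
    intro x
    rw [hS, PySem.List.mem_sorted, hkeys, PySem.Set.mem_ofList]
  have hSnodup : S.Nodup := by
    rw [hS]
    exact ((PySem.List.sorted_perm cnt.keys (fun x => x) false).nodup_iff).mpr
      (by rw [hkeys]; exact PySem.Set.nodup_ofList reserve)
  have hSpair : S.Pairwise (· ≤ ·) := PySem.List.sorted_pairwise cnt.keys (fun x => x)
  rw [PySem.List.foldl_append_eq_flatMap, List.nil_append]
  set spare := S.flatMap (fun v => List.replicate (cnt.getD v 0).toNat v) with hspare
  have hsparecnt : ∀ x : Int, spare.count x = stA.2.count x := by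
    intro x
    rw [hspare, count_flatMap_replicate _ x S hSnodup, hSnd x]
    by_cases hx : x ∈ reserve
    · rw [if_pos ((hSmem x).mpr hx), if_pos hx, hgetD x, if_pos hx]
      have hle : lost.count x ≤ reserve.count x := by
        by_cases hxl : x ∈ lost
        · exact hpre x hxl hx
        · simp [List.count_eq_zero_of_not_mem hxl]
      omega
    · rw [if_neg (fun h => hx ((hSmem x).mp h)), if_neg hx,
        List.count_eq_zero_of_not_mem hx]
  have hsparepair : spare.Pairwise (· ≤ ·) := pairwise_flatMap_replicate _ S hSpair
  have hspareeq : PySem.List.sorted stA.2 (fun x => x) false = spare :=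
    PySem.List.sorted_id_eq_of_perm_of_pairwise _ _
      (List.perm_iff_count.mpr (fun x => hsparecnt x)) hsparepair
  rw [hneed, hspareeq]
  -- the main loop equivalence
  congr 1
  apply tp_eq_solWhile
  · exact PySem.List.sorted_pairwise _ _
  · exact hsparepair
  · intro v hv hvs
    have hnotr : v ∉ reserve := by
      have hv1 := (PySem.List.mem_sorted _ _ _ _).mp hv
      have hcv := (List.mem_filter.mp hv1).2
      rw [hcontains] at hcv
      simpa using hcv
    have hvr : v ∈ reserve := by
      have hc := List.count_pos_iff.mpr hvs
      rw [hsparecnt v, hSnd v] at hc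
      by_contra hnr
      rw [if_neg hnr, List.count_eq_zero_of_not_mem hnr] at hc
      omega
    exact hnotr hvr

-- ===== VERDICT (by name: the statement is the Claim_ definition above) =====
theorem solution_spec : Claim_equal_solution := by
  intro n lost reserve _ hpre
  exact solution_eq n lost reserve hpre
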